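-- pv_equiv track=rewrite | github.com/KAMI-Wei/ml-model | n/model/corrector.py | reductions
-- ===== SOURCE A (Python) =====
-- from itertools import product
--
-- def number_of_dupes(string, idx):
--     """返回string[idx]在后面被重复的次数"""
--     # "abccdefgh", 2  returns 1
--     initial_idx = idx
--     last = string[idx]
--     while idx + 1 < len(string) and string[idx + 1] == last:
--         idx += 1
--     return idx - initial_idx
--
-- def reductions(word):
--     """获取删除重复字母后的单词"""
--     word = list(word)
--     # ['h','i', 'i', 'i'] becomes ['h', ['i', 'ii', 'iii']]
--     for idx, l in enumerate(word):
--         n = number_of_dupes(word, idx)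
--         # if letter appears more than once in a row
--         if n:
--             # generate a flat list of options ('hhh' becomes ['h','hh','hhh'])
--             # only take up to 3, there are no 4 letter repetitions in english
--             flat_dupes = [l * (r + 1) for r in range(n + 1)][:3]
--             # remove duplicate letters in original word
--             for _ in range(n):
--                 word.pop(idx + 1)
--             # replace original letter with flat list
--             word[idx] = flat_dupes
--
--     # ['h',['i','ii','iii']] becomes 'hi','hii','hiii'
--     for p in product(*word):
--         yield ''.join(p)
-- ===== SOURCE B (Python) =====
-- def reductions(word):
--     """获取删除重复字母后的单词"""
--     # single left-to-right pass grouping runs of equal chars into capped option lists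
--     groups = []
--     chars = list(word)
--     while chars:
--         c = chars[0]
--         run = 1
--         while run < len(chars) and chars[run] == c:
--             run += 1
--         groups.append([c * (r + 1) for r in range(min(run, 3))])
--         chars = chars[run:]
--     outs = ['']
--     for opts in groups:
--         outs = [s + o for s in outs for o in opts]
--     yield from outs
-- ===== Notes on version B (the rewrite author's own statement) =====
-- stated objective: alternative
-- what changed: B replaces A's in-place list mutation (number_of_dupes rescans plus per-letter pop(idx+1) splices and itertools.product over a mixed char/list structure) with a plain left-to-right scan that slices off each run of equal letters into a capped option list, then builds the product with an accumulator fold; the exponential output dominates the run time, so this is not measurably faster.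
import Mathlib
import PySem

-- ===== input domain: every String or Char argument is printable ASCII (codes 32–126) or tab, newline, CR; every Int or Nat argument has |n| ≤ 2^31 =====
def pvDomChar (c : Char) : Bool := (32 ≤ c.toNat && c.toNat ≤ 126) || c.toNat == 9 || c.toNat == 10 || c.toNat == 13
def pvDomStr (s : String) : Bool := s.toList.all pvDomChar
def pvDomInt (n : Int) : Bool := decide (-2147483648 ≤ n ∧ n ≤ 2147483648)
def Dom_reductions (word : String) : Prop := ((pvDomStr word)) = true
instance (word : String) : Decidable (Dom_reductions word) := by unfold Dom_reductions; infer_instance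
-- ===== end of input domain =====

-- B replaces A's in-place mutation pass (rescans, pops, product over a mixed structure) with a plain scan over runs; objective: alternative.
-- Note: Python's `reductions` is a generator; equivalence is about the sequence of yielded values, as a list.

-- ===== PORT A =====
-- A's working list holds either an untouched letter (Sum.inl) or a spliced-in option list (Sum.inr).

-- Python `l * (r+1)` for a character l
def pvRepA (c : Char) (k : Nat) : String := String.mk (List.replicate k c)

-- number_of_dupes: the while loop, counting how often the next element equals `last`
def pvNodGo (w : List (Sum Char (List String))) (idx : Nat) (last : Sum Char (List String)) : Nat :=
  if h : w[idx+1]? = some last then pvNodGo w (idx+1) last + 1 else 0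
termination_by w.length - idx
decreasing_by
  have : idx + 1 < w.length := (List.getElem?_eq_some_iff.mp h).1
  omega

def pvNod (w : List (Sum Char (List String))) (idx : Nat) : Nat :=
  match w[idx]? with
  | some last => pvNodGo w idx last
  | none => 0

-- `for _ in range(n): word.pop(idx+1)`
def pvPopN (w : List (Sum Char (List String))) (i : Nat) : Nat → List (Sum Char (List String))
  | 0 => w
  | n+1 => pvPopN (w.take i ++ w.drop (i+1)) i n

theorem pvPopN_length_le (w : List (Sum Char (List String))) (i n : Nat) :
    (pvPopN w i n).length ≤ w.length := by
  induction n generalizing w with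
  | zero => simp [pvPopN]
  | succ n ih =>
    calc (pvPopN (w.take i ++ w.drop (i+1)) i n).length
        ≤ (w.take i ++ w.drop (i+1)).length := ih _
      _ ≤ w.length := by simp; omega

-- the `for idx, l in enumerate(word)` loop over the live, mutated list
def pvLoopA (w : List (Sum Char (List String))) (idx : Nat) : List (Sum Char (List String)) :=
  if h : idx < w.length then
    let l := w[idx]
    let n := pvNod w idx
    if n ≠ 0 then
      -- the Sum.inr case of `l * (r+1)` is unreachable: elements at ≥ idx are untouched letters
      let flat : List String :=
        (((List.range (n+1)).map (fun r =>
            match l with | Sum.inl c => pvRepA c (r+1) | Sum.inr _ => "")).take 3)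
      pvLoopA ((pvPopN w (idx+1) n).set idx (Sum.inr flat)) (idx+1)
    else pvLoopA w (idx+1)
  else w
termination_by w.length - idx
decreasing_by
  · have := pvPopN_length_le w (idx+1) (pvNod w idx)
    simp only [List.length_set]
    omega
  · omega

-- `product(*word)` with ''.join: a bare letter contributes its single string
def pvExpand : Sum Char (List String) → List String
  | Sum.inl c => [String.singleton c]
  | Sum.inr ls => ls

def pvProdJoin : List (Sum Char (List String)) → List String
  | [] => [""]
  | x :: xs => (pvExpand x).flatMap (fun o => (pvProdJoin xs).map (fun s => o ++ s))

def reductions (word : String) : List String :=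
  pvProdJoin (pvLoopA (word.toList.map Sum.inl) 0)

-- ===== PORT B =====
-- inner `while run < len(chars) and chars[run] == c: run += 1`
def pvRunGo (chars : List Char) (c : Char) (run : Nat) : Nat :=
  if h : chars[run]? = some c then pvRunGo chars c (run+1) else run
termination_by chars.length - run
decreasing_by
  have : run + 1 ≤ chars.length := (List.getElem?_eq_some_iff.mp h).1
  omega

theorem pvRunGo_ge (chars : List Char) (c : Char) (run : Nat) : run ≤ pvRunGo chars c run := by
  rw [pvRunGo]
  split
  · have := pvRunGo_ge chars c (run+1); omega
  · exact Nat.le_refl _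
termination_by chars.length - run
decreasing_by
  have : run + 1 ≤ chars.length := (List.getElem?_eq_some_iff.mp (by assumption)).1
  omega

-- `[c * (r + 1) for r in range(min(run, 3))]`
def pvOpts (c : Char) (k : Nat) : List String :=
  (List.range k).map (fun r => String.mk (List.replicate (r+1) c))

-- outer `while chars:` loop collecting the groups
def pvGroups : List Char → List (List String)
  | [] => []
  | c :: rest =>
    let run := pvRunGo (c :: rest) c 1
    pvOpts c (min run 3) :: pvGroups ((c :: rest).drop run)
termination_by cs => cs.length
decreasing_by
  have := pvRunGo_ge (c :: rest) c 1
  simp only [List.length_drop, List.length_cons]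
  omega

def reductions_alt (word : String) : List String :=
  (pvGroups word.toList).foldl
    (fun outs opts => outs.flatMap (fun s => opts.map (fun o => s ++ o))) [""]

-- ===== PRECONDITION & SPEC =====
def Spec_reductions (word : String) (out : List String) : Prop := out = reductions_alt word
instance (word : String) (out : List String) : Decidable (Spec_reductions word out) := by unfold Spec_reductions; infer_instance

-- ===== CLAIM (what is proved, stated in full; the proofs are below) =====
def Claim_equal_reductions : Prop := ∀ (word : String), Dom_reductions word → Spec_reductions word (reductions word)

-- ===== LEMMAS AND PROOFS =====

-- proof-side: length of the leading run of c's
def pvLead (c : Char) : List Char → Nat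
  | [] => 0
  | d :: t => if d = c then pvLead c t + 1 else 0

theorem pvLead_le (c : Char) (l : List Char) : pvLead c l ≤ l.length := by
  induction l with
  | nil => simp [pvLead]
  | cons d t ih => simp only [pvLead]; split <;> simp <;> omega

theorem pvRunGo_spec (chars : List Char) (c : Char) (run : Nat) :
    pvRunGo chars c run = run + pvLead c (chars.drop run) := by
  rw [pvRunGo]
  rcases h : chars[run]? with _ | d
  · have hlen : chars.length ≤ run := by
      by_contra hc
      exact absurd h (by simp [List.getElem?_eq_getElem (by omega : run < chars.length)])
    simp [h, List.drop_eq_nil_of_le hlen, pvLead]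
  · have hlt : run < chars.length := (List.getElem?_eq_some_iff.mp h).1
    have hd : chars.drop run = d :: chars.drop (run+1) := by
      rw [List.drop_eq_getElem_cons hlt]
      have hcd : chars[run] = d := (List.getElem?_eq_some_iff.mp h).2
      rw [hcd]
    by_cases hdc : d = c
    · subst hdc
      rw [dif_pos rfl, pvRunGo_spec chars d (run+1), hd]
      simp [pvLead]; omega
    · rw [dif_neg (by simp [hdc]), hd]
      simp [pvLead, hdc]
termination_by chars.length - run
decreasing_by omega

theorem pvGroups_cons (c : Char) (rest : List Char) :
    pvGroups (c :: rest) =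
      pvOpts c (min (1 + pvLead c rest) 3) :: pvGroups (rest.drop (pvLead c rest)) := by
  rw [pvGroups]
  have h1 : pvRunGo (c :: rest) c 1 = 1 + pvLead c rest := by
    rw [pvRunGo_spec]; simp
  simp only [h1, Nat.add_comm 1 (pvLead c rest), List.drop_succ_cons]

theorem pvNodGo_spec (rest : List Char) (pre : List (Sum Char (List String))) (c : Char) :
    pvNodGo (pre ++ (c :: rest).map Sum.inl) pre.length (Sum.inl c) = pvLead c rest := by
  induction rest generalizing pre with
  | nil =>
    simp only [List.map_cons, List.map_nil]
    rw [pvNodGo, dif_neg]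
    · simp [pvLead]
    · rw [List.getElem?_eq_none (by simp)]; simp
  | cons d t ih =>
    simp only [List.map_cons]
    rw [pvNodGo]
    have hget : (pre ++ Sum.inl c :: Sum.inl d :: t.map Sum.inl)[pre.length+1]? = some (Sum.inl d) := by
      rw [List.getElem?_append_right (by omega)]
      simp
    by_cases hdc : d = c
    · subst hdc
      rw [dif_pos (by rw [hget])]
      have h2 := ih (pre ++ [Sum.inl d])
      simp only [List.map_cons, List.length_append, List.length_cons, List.length_nil,
        List.append_assoc, List.cons_append, List.nil_append] at h2
      simp only [show pre.length + (0 + 1) = pre.length + 1 by omega] at h2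
      rw [h2]
      simp [pvLead]
    · rw [dif_neg (by rw [hget]; simp [hdc])]
      simp [pvLead, hdc]

theorem pvNod_spec (rest : List Char) (pre : List (Sum Char (List String))) (c : Char) :
    pvNod (pre ++ (c :: rest).map Sum.inl) pre.length = pvLead c rest := by
  have hget : (pre ++ (c :: rest).map Sum.inl)[pre.length]? = some (Sum.inl c) := by
    rw [List.getElem?_append_right (le_refl _)]
    simp
  simp only [pvNod, hget]
  exact pvNodGo_spec rest pre c

theorem pvPopN_append (n : Nat) (pre l : List (Sum Char (List String))) (h : n ≤ l.length) :
    pvPopN (pre ++ l) pre.length n = pre ++ l.drop n := by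
  induction n generalizing l with
  | zero => simp [pvPopN]
  | succ n ih =>
    match l, h with
    | x :: t, h =>
      rw [pvPopN]
      have e1 : (pre ++ x :: t).take pre.length = pre := by simp
      have e2 : (pre ++ x :: t).drop (pre.length + 1) = t := by simp
      rw [e1, e2, ih t (by simpa using h)]
      simp

theorem pvLoopA_spec (cs : List Char) (done : List (Sum Char (List String))) :
    (pvLoopA (done ++ cs.map Sum.inl) done.length).map pvExpand
      = done.map pvExpand ++ pvGroups cs := by
  match cs with
  | [] =>
    simp only [List.map_nil, List.append_nil]
    rw [pvLoopA, dif_neg (by omega)]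
    simp [pvGroups]
  | c :: rest =>
    have hlt : done.length < (done ++ (c :: rest).map Sum.inl).length := by simp
    have hl : (done ++ (c :: rest).map Sum.inl)[done.length] = Sum.inl c := by
      have hq : (done ++ (c :: rest).map Sum.inl)[done.length]? = some (Sum.inl c) := by
        rw [List.getElem?_append_right (le_refl _)]; simp
      obtain ⟨_, he⟩ := List.getElem?_eq_some_iff.mp hq
      exact he
    have hn := pvNod_spec rest done c
    rw [pvLoopA, dif_pos hlt]
    simp only [hl, hn]
    by_cases h0 : pvLead c rest = 0
    · rw [if_neg (by simp [h0])]
      have e : done ++ (c :: rest).map Sum.inl = (done ++ [Sum.inl c]) ++ rest.map Sum.inl := by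
        simp
      have hlen : done.length + 1 = (done ++ [Sum.inl c]).length := by simp
      rw [e, hlen, pvLoopA_spec rest (done ++ [Sum.inl c])]
      rw [pvGroups_cons, h0]
      simp [pvExpand, pvOpts, String.singleton]
      rfl
    · rw [if_pos (by simp [h0])]
      have e1 : pvPopN (done ++ (c :: rest).map Sum.inl) (done.length + 1) (pvLead c rest)
          = (done ++ [Sum.inl c]) ++ (rest.drop (pvLead c rest)).map Sum.inl := by
        have h := pvPopN_append (pvLead c rest) (done ++ [Sum.inl c]) (rest.map Sum.inl)
          (by simpa using pvLead_le c rest)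
        simpa using h
      rw [e1]
      have e2 : ∀ y : Sum Char (List String),
          ((done ++ [Sum.inl c]) ++ (rest.drop (pvLead c rest)).map Sum.inl).set done.length y
            = (done ++ [y]) ++ (rest.drop (pvLead c rest)).map Sum.inl := by
        intro y; simp
      rw [e2]
      have hlen2 : ∀ y : Sum Char (List String), done.length + 1 = (done ++ [y]).length := by
        intro y; simp
      rw [hlen2, pvLoopA_spec (rest.drop (pvLead c rest)) (done ++ [_])]
      rw [pvGroups_cons]
      have hflat : List.take 3 ((List.range (pvLead c rest + 1)).map (fun r => pvRepA c (r + 1)))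
          = pvOpts c (min (1 + pvLead c rest) 3) := by
        simp only [pvOpts, pvRepA]
        rw [← List.map_take, List.take_range, Nat.min_comm, Nat.add_comm 1]
      simp [pvExpand, hflat]
termination_by cs.length
decreasing_by
  all_goals first
    | (simp [List.length_drop]; omega)
    | simp
    | omega

-- product over the expanded groups
def pvProdF : List (List String) → List String
  | [] => [""]
  | g :: gs => g.flatMap (fun o => (pvProdF gs).map (fun s => o ++ s))

theorem pvProdJoin_eq (w : List (Sum Char (List String))) :
    pvProdJoin w = pvProdF (w.map pvExpand) := by
  induction w with
  | nil => rfl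
  | cons x xs ih => simp [pvProdJoin, pvProdF, ih]

theorem foldl_prod (gs : List (List String)) (outs : List String) :
    gs.foldl (fun outs opts => outs.flatMap (fun s => opts.map (fun o => s ++ o))) outs
      = outs.flatMap (fun s => (pvProdF gs).map (fun t => s ++ t)) := by
  induction gs generalizing outs with
  | nil => simp [pvProdF]
  | cons g gs ih =>
    rw [List.foldl_cons, ih]
    simp [pvProdF, List.flatMap_assoc, List.map_flatMap, List.flatMap_map, List.map_map,
      Function.comp_def, String.append_assoc]

-- ===== VERDICT (by name: the statement is the Claim_ definition above) =====
theorem reductions_spec : Claim_equal_reductions := by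
  intro word _
  unfold Spec_reductions reductions reductions_alt
  have h0 : (pvLoopA (([] : List (Sum Char (List String))) ++ word.toList.map Sum.inl)
      ([] : List (Sum Char (List String))).length).map pvExpand = pvGroups word.toList := by
    rw [pvLoopA_spec]; simp
  rw [pvProdJoin_eq]
  simp only [List.nil_append, List.length_nil] at h0
  rw [h0, foldl_prod]
  simp
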